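-- pv_equiv track=rewrite | github.com/rupandman/competitiveProg | getphonenumber.py | getPhoneNumber
-- ===== SOURCE A (Python) =====
-- from itertools import groupby
--
-- def getPhoneNumber(number):
--     ls = [tuple(y) for x, y in groupby(number)]
--     res = []
--     dic = {'0': "zero", '1':"one", '2':"two", '3':"three", '4':"four", '5':"five", '6':"six", '7':"seven", '8':"eight", '9':"nine"}
--     for i in ls:
--         if len(i)==1:
--             res.append(dic[i[0]])
--         if len(i)==2:
--             res.append(f"double {dic[i[0]]}")
--         if len(i)==3:
--             res.append(f"triple {dic[i[0]]}")
--         if len(i)>2 and len(i)%2==0: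
--             res.append((f"double {dic[i[0]]} " * (len(i)//2)).rstrip())
--         if len(i)>3 and len(i)%2!=0:
--             res.extend(((f"double {dic[i[0]]} " * ((len(i) // 2) - 1)).rstrip(), "triple " + dic[i[0]]))
--
--     return " ".join(res)
-- ===== SOURCE B (Python) =====
-- from itertools import groupby
--
-- def getPhoneNumber(number):
--     dic = {'0': "zero", '1': "one", '2': "two", '3': "three", '4': "four",
--            '5': "five", '6': "six", '7': "seven", '8': "eight", '9': "nine"}
--     words = []
--     for d, g in groupby(number):
--         n = len(list(g))
--         w = dic[d]
--         if n == 1: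
--             words.append(w)
--         else:
--             while n:
--                 if n == 3:
--                     words.append("triple " + w)
--                     n = 0
--                 else:
--                     words.append("double " + w)
--                     n -= 2
--     return " ".join(words)
-- ===== Notes on version B (the rewrite author's own statement) =====
-- stated objective: simpler
-- what changed: A formats each digit run through five parallel length/parity branches built on string repetition and rstrip; B replaces them with a single peel loop over the run length that emits one double- or triple-word at a time and joins everything at the end.
import Mathlib
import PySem

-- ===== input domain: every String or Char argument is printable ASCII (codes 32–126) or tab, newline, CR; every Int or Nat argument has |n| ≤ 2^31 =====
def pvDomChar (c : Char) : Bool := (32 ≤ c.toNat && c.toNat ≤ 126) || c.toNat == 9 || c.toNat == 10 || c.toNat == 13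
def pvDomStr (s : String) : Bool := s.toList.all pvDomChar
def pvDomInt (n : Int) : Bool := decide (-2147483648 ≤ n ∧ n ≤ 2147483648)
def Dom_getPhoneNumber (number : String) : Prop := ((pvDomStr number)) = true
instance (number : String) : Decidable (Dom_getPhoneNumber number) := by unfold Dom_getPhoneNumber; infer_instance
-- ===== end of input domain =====

-- B replaces A's five arithmetic formula branches (string repetition + rstrip) by a single
-- peel loop over each digit run; objective: simpler.


-- ===== PORT A =====
-- itertools.groupby over the characters (both Pythons call it); keys are the chars themselves,
-- so each run is the maximal block of equal adjacent chars.  Exact.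
def pvGroup (l : List Char) : List (List Char) :=
  l.foldr
    (fun c acc =>
      match acc with
      | [] => [[c]]
      | [] :: rest => [c] :: rest
      | (d :: ds) :: rest => if c == d then (c :: d :: ds) :: rest else [c] :: (d :: ds) :: rest)
    []

-- the dict literal of both Pythons (keys are chars; values as char lists)
def pvDic : PySem.Dict Char (List Char) :=
  PySem.Dict.mk [('0', "zero".toList), ('1', "one".toList), ('2', "two".toList),
    ('3', "three".toList), ('4', "four".toList), ('5', "five".toList), ('6', "six".toList),
    ('7', "seven".toList), ('8', "eight".toList), ('9', "nine".toList)]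

-- dic[c]; KeyError (non-digit char) is excluded by Pre_, so the default is never reached there
def pvWord (c : Char) : List Char := pvDic.getD c []

-- A's loop body: the five (mutually exclusive in effect) conditional appends, transliterated
def pvPiecesA (i : List Char) : List (List Char) :=
  let n := i.length
  let w := pvWord (i.headD ' ')   -- i[0]; runs produced by groupby are nonempty
  let res : List (List Char) := []
  let res := if n = 1 then res ++ [w] else res
  let res := if n = 2 then res ++ ["double ".toList ++ w] else res
  let res := if n = 3 then res ++ ["triple ".toList ++ w] else res
  let res := if n > 2 ∧ n % 2 = 0 then
      res ++ [PySem.Chars.rstrip (PySem.List.pyRepeat ("double ".toList ++ w ++ [' ']) (n / 2 : Nat))]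
    else res
  let res := if n > 3 ∧ n % 2 ≠ 0 then
      res ++ [PySem.Chars.rstrip (PySem.List.pyRepeat ("double ".toList ++ w ++ [' ']) ((n / 2 - 1 : Nat))),
              "triple ".toList ++ w]
    else res
  res

def getPhoneNumber (number : String) : String :=
  let ls := pvGroup number.toList
  let res := ls.foldl (fun res i => res ++ pvPiecesA i) []
  String.ofList (PySem.Chars.join [' '] res)

-- ===== PORT B =====
-- B's while-loop peeling a run of length n (n ≥ 2 at the call site): 'triple w' at 3, else 'double w' and n -= 2
def pvPeel (w : List Char) : Nat → List (List Char)
  | 0 => []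
  | (n + 1) =>
      if n + 1 = 3 then ["triple ".toList ++ w]
      else ("double ".toList ++ w) :: pvPeel w (n - 1)

def getPhoneNumber_alt (number : String) : String :=
  let words := (pvGroup number.toList).foldl
    (fun ws i =>
      let n := i.length
      let w := pvWord (i.headD ' ')   -- dic[d], the group key
      if n = 1 then ws ++ [w] else ws ++ pvPeel w n)
    []
  String.ofList (PySem.Chars.join [' '] words)

-- ===== PRECONDITION & SPEC =====
-- Pre_ excludes exactly the inputs containing a non-digit character, where Python A raises KeyError.
def Pre_getPhoneNumber (number : String) : Prop :=
  (number.toList.all PySem.Chars.isdigit) = true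
instance (number : String) : Decidable (Pre_getPhoneNumber number) := by
  unfold Pre_getPhoneNumber; infer_instance

def pvWitness_getPhoneNumber : String := "0"

def Spec_getPhoneNumber (number : String) (out : String) : Prop := out = getPhoneNumber_alt number
instance (number : String) (out : String) : Decidable (Spec_getPhoneNumber number out) := by unfold Spec_getPhoneNumber; infer_instance

-- ===== CLAIM (what is proved, stated in full; the proofs are below) =====
def Claim_equal_getPhoneNumber : Prop := ∀ (number : String), Dom_getPhoneNumber number → Pre_getPhoneNumber number → Spec_getPhoneNumber number (getPhoneNumber number)

-- ===== LEMMAS AND PROOFS =====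

-- B's per-run contribution (proof-only helper)
def pvPiecesB (i : List Char) : List (List Char) :=
  let n := i.length
  let w := pvWord (i.headD ' ')
  if n = 1 then [w] else pvPeel w n

theorem pvPeel_two_mul (w : List Char) : ∀ k, pvPeel w (2 * k + 2) = List.replicate (k + 1) ("double ".toList ++ w)
  | 0 => by simp [pvPeel]
  | (k + 1) => by
      rw [show 2 * (k + 1) + 2 = (2 * k + 3) + 1 by ring]
      rw [pvPeel]
      simp only [show ¬(2 * k + 3 + 1 = 3) by omega, show 2 * k + 3 - 1 = 2 * k + 2 by omega]
      rw [pvPeel_two_mul w k]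
      simp [List.replicate_succ]

theorem pvPeel_two_mul_odd (w : List Char) : ∀ k, pvPeel w (2 * k + 3) = List.replicate k ("double ".toList ++ w) ++ ["triple ".toList ++ w]
  | 0 => by simp [pvPeel]
  | (k + 1) => by
      rw [show 2 * (k + 1) + 3 = (2 * k + 4) + 1 by ring]
      rw [pvPeel]
      simp only [show ¬(2 * k + 4 + 1 = 3) by omega, show 2 * k + 4 - 1 = 2 * k + 3 by omega]
      rw [pvPeel_two_mul_odd w k]
      simp [List.replicate_succ]

theorem pvJoin_append_ne (xs ys : List (List Char)) (hx : xs ≠ []) (hy : ys ≠ []) :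
    PySem.Chars.join [' '] (xs ++ ys) = PySem.Chars.join [' '] xs ++ ' ' :: PySem.Chars.join [' '] ys := by
  induction xs with
  | nil => exact absurd rfl hx
  | cons x xs ih =>
      cases xs with
      | nil =>
          cases ys with
          | nil => exact absurd rfl hy
          | cons y ys => simp [PySem.Chars.join_cons_cons, PySem.Chars.join_singleton]
      | cons x' xs' =>
          rw [List.cons_append, List.cons_append, PySem.Chars.join_cons_cons]
          rw [show x' :: (xs' ++ ys) = (x' :: xs') ++ ys from rfl]
          rw [ih (by simp), PySem.Chars.join_cons_cons]
          simp

theorem pvRep_eq (d : List Char) : ∀ k, PySem.List.pyRepeat (d ++ [' ']) ((k + 1 : Nat) : Int) =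
    PySem.Chars.join [' '] (List.replicate (k + 1) d) ++ [' ']
  | 0 => by simp [PySem.List.pyRepeat, PySem.Chars.join_singleton]
  | (k + 1) => by
      have ih := pvRep_eq d k
      simp only [PySem.List.pyRepeat, Int.toNat_natCast] at ih ⊢
      rw [show List.replicate (k + 1 + 1) (d ++ [' ']) = (d ++ [' ']) :: List.replicate (k + 1) (d ++ [' ']) from List.replicate_succ ..]
      rw [List.flatten_cons, ih]
      rw [show List.replicate (k + 1 + 1) d = d :: List.replicate (k + 1) d from List.replicate_succ ..]
      rw [show List.replicate (k + 1) d = d :: List.replicate k d from List.replicate_succ ..]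
      rw [PySem.Chars.join_cons_cons]
      simp

theorem pvRstrip_append_space (l : List Char) :
    PySem.Chars.rstrip (l ++ [' ']) = PySem.Chars.rstrip l := by
  simp [PySem.Chars.rstrip, show PySem.Chars.isspace ' ' = true by decide]

theorem pvRstrip_snoc (l : List Char) (c : Char) (hc : PySem.Chars.isspace c = false) :
    PySem.Chars.rstrip (l ++ [c]) = l ++ [c] := by
  simp [PySem.Chars.rstrip, hc]

theorem pvJoin_replicate_snoc (d : List Char) : ∀ k, ∃ pre,
    PySem.Chars.join [' '] (List.replicate (k + 1) d) = pre ++ d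
  | 0 => ⟨[], by simp [PySem.Chars.join_singleton]⟩
  | (k + 1) => by
      obtain ⟨pre, hpre⟩ := pvJoin_replicate_snoc d k
      refine ⟨d ++ ' ' :: pre, ?_⟩
      rw [show List.replicate (k + 1 + 1) d = d :: List.replicate (k + 1) d from List.replicate_succ ..]
      rw [show List.replicate (k + 1) d = d :: List.replicate k d from List.replicate_succ ..] at hpre ⊢
      rw [PySem.Chars.join_cons_cons, hpre]
      simp

-- the word of every digit ends in a non-space letter
theorem pvWord_shape (c : Char) (hc : c ∈ ['0', '1', '2', '3', '4', '5', '6', '7', '8', '9']) :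
    ∃ pre e, pvWord c = pre ++ [e] ∧ PySem.Chars.isspace e = false := by
  fin_cases hc
  · exact ⟨['z','e','r'], 'o', by decide⟩
  · exact ⟨['o','n'], 'e', by decide⟩
  · exact ⟨['t','w'], 'o', by decide⟩
  · exact ⟨['t','h','r','e'], 'e', by decide⟩
  · exact ⟨['f','o','u'], 'r', by decide⟩
  · exact ⟨['f','i','v'], 'e', by decide⟩
  · exact ⟨['s','i'], 'x', by decide⟩
  · exact ⟨['s','e','v','e'], 'n', by decide⟩
  · exact ⟨['e','i','g','h'], 't', by decide⟩
  · exact ⟨['n','i','n'], 'e', by decide⟩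

theorem pvDigit_mem (c : Char) (h : PySem.Chars.isdigit c = true) :
    c ∈ ['0', '1', '2', '3', '4', '5', '6', '7', '8', '9'] := by
  simp only [PySem.Chars.isdigit, Bool.and_eq_true, decide_eq_true_eq] at h
  have h1 : 48 ≤ c.toNat := Nat.succ_le_of_lt h.1
  have h2 : c.toNat ≤ 57 := Fin.mk_le_mk.mp h.2
  have hc : c = Char.ofNat c.toNat := (Char.ofNat_toNat c).symm
  rw [hc]
  interval_cases c.toNat <;> decide

theorem pvGroup_props : ∀ (l : List Char), ∀ i ∈ pvGroup l, i ≠ [] ∧ ∀ c ∈ i, c ∈ l := by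
  intro l
  induction l with
  | nil => intro i hi; simp [pvGroup] at hi
  | cons a l ih =>
      intro i hi
      have hstep : pvGroup (a :: l) =
          (match pvGroup l with
            | [] => [[a]]
            | [] :: rest => [a] :: rest
            | (d :: ds) :: rest =>
                if a == d then (a :: d :: ds) :: rest else [a] :: (d :: ds) :: rest) := rfl
      rw [hstep] at hi
      cases hg : pvGroup l with
      | nil =>
          rw [hg] at hi; simp at hi
          subst hi; exact ⟨by simp, by intro c hc; simp at hc; simp [hc]⟩
      | cons j rest =>
          cases j with
          | nil =>
              rw [hg] at hi; simp at hi
              rcases hi with hi | hi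
              · subst hi; exact ⟨by simp, by intro c hc; simp at hc; simp [hc]⟩
              · obtain ⟨hne, hmem⟩ := ih i (by rw [hg]; simp [hi])
                exact ⟨hne, fun c hc => by simp [hmem c hc]⟩
          | cons d ds =>
              rw [hg] at hi
              replace hi : i ∈ (if (a == d) = true then (a :: d :: ds) :: rest
                  else [a] :: (d :: ds) :: rest) := hi
              by_cases had : a == d
              · rw [if_pos had] at hi
                simp at hi
                rcases hi with hi | hi
                · subst hi
                  refine ⟨by simp, ?_⟩
                  intro c hc
                  rcases List.mem_cons.mp hc with h | h
                  · simp [h]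
                  · obtain ⟨_, hmem⟩ := ih (d :: ds) (by rw [hg]; simp)
                    simp [hmem c h]
                · obtain ⟨hne, hmem⟩ := ih i (by rw [hg]; simp [hi])
                  exact ⟨hne, fun c hc => by simp [hmem c hc]⟩
              · rw [if_neg had] at hi
                simp at hi
                rcases hi with hi | hi | hi
                · subst hi; exact ⟨by simp, by intro c hc; simp at hc; simp [hc]⟩
                · obtain ⟨hne, hmem⟩ := ih i (by rw [hg]; simp [hi])
                  exact ⟨hne, fun c hc => by simp [hmem c hc]⟩
                · obtain ⟨hne, hmem⟩ := ih i (by rw [hg]; simp [hi])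
                  exact ⟨hne, fun c hc => by simp [hmem c hc]⟩

theorem pvPeel_ne_nil (w : List Char) (n : Nat) (hn : 1 ≤ n) : pvPeel w n ≠ [] := by
  obtain ⟨m, rfl⟩ : ∃ m, n = m + 1 := ⟨n - 1, by omega⟩
  rw [pvPeel]
  split <;> simp

theorem pvPieces_cases (i : List Char) (hne : i ≠ [])
    (hdig : i.headD ' ' ∈ ['0', '1', '2', '3', '4', '5', '6', '7', '8', '9']) :
    pvPiecesA i ≠ [] ∧ pvPiecesB i ≠ [] ∧
      PySem.Chars.join [' '] (pvPiecesA i) = PySem.Chars.join [' '] (pvPiecesB i) := by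
  obtain ⟨pre, e, hwe, hsp⟩ := pvWord_shape _ hdig
  have hpos : 0 < i.length := List.length_pos_of_ne_nil hne
  rcases (by omega :
      i.length = 1 ∨ i.length = 2 ∨ i.length = 3 ∨
        (4 ≤ i.length ∧ i.length % 2 = 0) ∨ (5 ≤ i.length ∧ i.length % 2 = 1)) with
    h | h | h | ⟨h4, hev⟩ | ⟨h5, hod⟩
  · have hA : pvPiecesA i = [pvWord (i.headD ' ')] := by unfold pvPiecesA; simp [h]
    have hB : pvPiecesB i = [pvWord (i.headD ' ')] := by unfold pvPiecesB; simp [h]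
    simp [hA, hB]
  · have hA : pvPiecesA i = ["double ".toList ++ pvWord (i.headD ' ')] := by
      unfold pvPiecesA; simp [h]
    have hB : pvPiecesB i = ["double ".toList ++ pvWord (i.headD ' ')] := by
      unfold pvPiecesB; rw [h]; simp [pvPeel]
    simp [hA, hB]
  · have hA : pvPiecesA i = ["triple ".toList ++ pvWord (i.headD ' ')] := by
      unfold pvPiecesA; simp [h]
    have hB : pvPiecesB i = ["triple ".toList ++ pvWord (i.headD ' ')] := by
      unfold pvPiecesB; rw [h]; simp [pvPeel]
    simp [hA, hB]
  · -- even run of length ≥ 4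
    obtain ⟨m, hm⟩ : ∃ m, i.length = 2 * m + 4 := ⟨(i.length - 4) / 2, by omega⟩
    have hA : pvPiecesA i =
        [PySem.Chars.rstrip (PySem.List.pyRepeat
          ("double ".toList ++ (pvWord (i.headD ' ') ++ [' '])) ((m + 2 : Nat) : Int))] := by
      unfold pvPiecesA
      rw [hm]
      simp [show ¬(2 * m + 4 = 1) by omega, show ¬(2 * m + 4 = 2) by omega,
        show ¬(2 * m + 4 = 3) by omega, show 2 < 2 * m + 4 by omega,
        show (2 * m + 4) % 2 = 0 by omega, show (2 * m + 4) / 2 = m + 2 by omega]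
    have hB : pvPiecesB i = pvPeel (pvWord (i.headD ' ')) (2 * m + 4) := by
      unfold pvPiecesB; rw [hm]; simp [show ¬(2 * m + 4 = 1) by omega]
    have hpeel : pvPeel (pvWord (i.headD ' ')) (2 * m + 4) =
        List.replicate (m + 2) ("double ".toList ++ pvWord (i.headD ' ')) := by
      rw [show 2 * m + 4 = 2 * (m + 1) + 2 by ring, pvPeel_two_mul]
    have hrep := pvRep_eq ("double ".toList ++ pvWord (i.headD ' ')) (m + 1)
    obtain ⟨pre', hpre'⟩ := pvJoin_replicate_snoc ("double ".toList ++ pvWord (i.headD ' ')) (m + 1)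
    refine ⟨by simp [hA], by rw [hB]; exact pvPeel_ne_nil _ _ (by omega), ?_⟩
    rw [hA, hB, hpeel, PySem.Chars.join_singleton]
    rw [show "double ".toList ++ (pvWord (i.headD ' ') ++ [' ']) =
        ("double ".toList ++ pvWord (i.headD ' ')) ++ [' '] from (List.append_assoc ..).symm]
    rw [hrep, pvRstrip_append_space]
    rw [show (m + 1 + 1 : Nat) = m + 2 from rfl] at hpre' ⊢
    rw [hpre', hwe]
    rw [show pre' ++ ("double ".toList ++ (pre ++ [e])) =
        (pre' ++ "double ".toList ++ pre) ++ [e] by simp]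
    rw [pvRstrip_snoc _ _ hsp]
  · -- odd run of length ≥ 5
    obtain ⟨m, hm⟩ : ∃ m, i.length = 2 * m + 5 := ⟨(i.length - 5) / 2, by omega⟩
    have hA : pvPiecesA i =
        [PySem.Chars.rstrip (PySem.List.pyRepeat
            ("double ".toList ++ (pvWord (i.headD ' ') ++ [' '])) ((m + 1 : Nat) : Int)),
          "triple ".toList ++ pvWord (i.headD ' ')] := by
      unfold pvPiecesA
      rw [hm]
      simp [show ¬(2 * m + 5 = 1) by omega, show ¬(2 * m + 5 = 2) by omega,
        show ¬(2 * m + 5 = 3) by omega,        show 3 < 2 * m + 5 by omega, show (2 * m + 5) / 2 - 1 = m + 1 by omega]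
    have hB : pvPiecesB i = pvPeel (pvWord (i.headD ' ')) (2 * m + 5) := by
      unfold pvPiecesB; rw [hm]; simp [show ¬(2 * m + 5 = 1) by omega]
    have hpeel : pvPeel (pvWord (i.headD ' ')) (2 * m + 5) =
        List.replicate (m + 1) ("double ".toList ++ pvWord (i.headD ' ')) ++
          ["triple ".toList ++ pvWord (i.headD ' ')] := by
      rw [show 2 * m + 5 = 2 * (m + 1) + 3 by ring, pvPeel_two_mul_odd]
    have hrep := pvRep_eq ("double ".toList ++ pvWord (i.headD ' ')) m
    obtain ⟨pre', hpre'⟩ := pvJoin_replicate_snoc ("double ".toList ++ pvWord (i.headD ' ')) m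
    refine ⟨by simp [hA], by rw [hB]; exact pvPeel_ne_nil _ _ (by omega), ?_⟩
    rw [hA, hB, hpeel]
    rw [PySem.Chars.join_cons_cons, PySem.Chars.join_singleton]
    rw [pvJoin_append_ne _ _ (by simp) (by simp), PySem.Chars.join_singleton]
    rw [show "double ".toList ++ (pvWord (i.headD ' ') ++ [' ']) =
        ("double ".toList ++ pvWord (i.headD ' ')) ++ [' '] from (List.append_assoc ..).symm]
    rw [hrep, pvRstrip_append_space]
    rw [hpre', hwe]
    rw [show pre' ++ ("double ".toList ++ (pre ++ [e])) =
        (pre' ++ "double ".toList ++ pre) ++ [e] by simp]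
    rw [pvRstrip_snoc _ _ hsp]
    simp

theorem pvJoin_flatMap_eq (rs : List (List Char))
    (h : ∀ i ∈ rs, pvPiecesA i ≠ [] ∧ pvPiecesB i ≠ [] ∧
      PySem.Chars.join [' '] (pvPiecesA i) = PySem.Chars.join [' '] (pvPiecesB i)) :
    PySem.Chars.join [' '] (rs.flatMap pvPiecesA) = PySem.Chars.join [' '] (rs.flatMap pvPiecesB) := by
  induction rs with
  | nil => rfl
  | cons i rs ih =>
      obtain ⟨hA, hB, hJ⟩ := h i (by simp)
      cases rs with
      | nil => simpa using hJ
      | cons i' rs' =>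
          rw [show List.flatMap pvPiecesA (i :: i' :: rs') =
              pvPiecesA i ++ List.flatMap pvPiecesA (i' :: rs') from List.flatMap_cons ..]
          rw [show List.flatMap pvPiecesB (i :: i' :: rs') =
              pvPiecesB i ++ List.flatMap pvPiecesB (i' :: rs') from List.flatMap_cons ..]
          have hA' : (i' :: rs').flatMap pvPiecesA ≠ [] := by
            rw [List.flatMap_cons]
            have := (h i' (by simp)).1
            simp [List.append_eq_nil_iff]
            intro hcontra; exact absurd hcontra this
          have hB' : (i' :: rs').flatMap pvPiecesB ≠ [] := by
            rw [List.flatMap_cons]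
            have := (h i' (by simp)).2.1
            simp [List.append_eq_nil_iff]
            intro hcontra; exact absurd hcontra this
          rw [pvJoin_append_ne _ _ hA hA', pvJoin_append_ne _ _ hB hB', hJ,
            ih (fun j hj => h j (by simp [hj]))]

-- ===== VERDICT (by name: the statement is the Claim_ definition above) =====
theorem getPhoneNumber_spec : Claim_equal_getPhoneNumber := by
  intro number hdom hpre
  have hpre' : ∀ c ∈ number.toList, c ∈ ['0', '1', '2', '3', '4', '5', '6', '7', '8', '9'] := by
    unfold Pre_getPhoneNumber at hpre
    intro c hc
    exact pvDigit_mem c (List.all_eq_true.mp hpre c hc)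
  unfold Spec_getPhoneNumber getPhoneNumber getPhoneNumber_alt
  simp only
  congr 1
  have hbody : (fun (ws : List (List Char)) (i : List Char) =>
      let n := i.length
      let w := pvWord (i.headD ' ')
      if n = 1 then ws ++ [w] else ws ++ pvPeel w n) =
      (fun ws i => ws ++ pvPiecesB i) := by
    funext ws i
    unfold pvPiecesB
    simp only
    split <;> rfl
  rw [hbody]
  rw [PySem.List.foldl_append_eq_flatMap, PySem.List.foldl_append_eq_flatMap]
  simp only [List.nil_append]
  apply pvJoin_flatMap_eq
  intro i hi
  obtain ⟨hne, hmem⟩ := pvGroup_props number.toList i hi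
  refine pvPieces_cases i hne (hpre' _ ?_)
  cases i with
  | nil => exact absurd rfl hne
  | cons c cs => exact hmem c (by simp)
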